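-- pv_equiv track=rewrite | github.com/cookie-sid/LeetCode | 2165-smallest-value-of-the-rearranged-number/2165-smallest-value-of-the-rearranged-number.py | smallestNumber
-- ===== SOURCE A (Python) =====
-- def smallestNumber(num: int) -> int:
--
--     def getS(num):
--         tmp = str(num)
--         tmp = sorted(tmp)
--         for c in range(len(tmp)):
--             if tmp[c] != "0":
--                 tmp[c], tmp[0] = tmp[0], tmp[c]
--                 break
--         tmp = ''.join(tmp)
--         return int(tmp)
--
--     def getB(num):
--         tmp = str(num)
--         tmp = ''.join(sorted(tmp, reverse = True))
--         return int(tmp)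
--
--     if num < 0:
--         return -getB(-num)
--     else:
--         return getS(num)
-- ===== SOURCE B (Python) =====
-- def smallestNumber(num: int) -> int:
--     s = str(abs(num))
--     cnt = [0] * 10
--     for ch in s:
--         cnt[ord(ch) - 48] += 1
--     if num < 0:
--         out = []
--         for d in range(9, -1, -1):
--             out.append(chr(48 + d) * cnt[d])
--         return -int(''.join(out))
--     lead = 0
--     for d in range(1, 10):
--         if cnt[d] > 0:
--             lead = d
--             break
--     if lead == 0:
--         return 0
--     cnt[lead] -= 1
--     out = [chr(48 + lead), '0' * cnt[0]]
--     for d in range(1, 10):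
--         out.append(chr(48 + d) * cnt[d])
--     return int(''.join(out))
-- ===== Notes on version B (the rewrite author's own statement) =====
-- stated objective: alternative
-- what changed: Replaces both sorted() calls and the index swap loop with a ten-entry digit frequency table and direct count-and-reconstruct passes (smallest nonzero digit, then zeros, then ascending digits for non-negatives; descending digits for negatives).
import Mathlib
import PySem

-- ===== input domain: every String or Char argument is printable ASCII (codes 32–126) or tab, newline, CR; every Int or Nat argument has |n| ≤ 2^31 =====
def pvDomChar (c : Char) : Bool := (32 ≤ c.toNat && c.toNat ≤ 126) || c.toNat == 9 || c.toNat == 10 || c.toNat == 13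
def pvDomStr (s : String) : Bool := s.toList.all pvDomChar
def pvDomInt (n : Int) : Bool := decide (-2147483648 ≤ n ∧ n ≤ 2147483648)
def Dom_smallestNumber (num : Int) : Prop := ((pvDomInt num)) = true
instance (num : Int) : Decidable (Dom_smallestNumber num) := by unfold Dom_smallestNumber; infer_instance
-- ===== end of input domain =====

-- B replaces A's two sorted() calls and the index swap loop by a 10-entry digit
-- frequency table and direct count-and-reconstruct passes; return value only, no mutation.

-- ===== PORT A =====
-- 'for c in range(len(tmp)): if tmp[c] != "0": tmp[c], tmp[0] = tmp[0], tmp[c]; break'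
def pvSwapGo (tmp : List Char) : List Nat → List Char
  | [] => tmp
  | c :: rest =>
    if (tmp.getD c ' ') ≠ '0' then
      (tmp.set c (tmp.getD 0 ' ')).set 0 (tmp.getD c ' ')
    else pvSwapGo tmp rest

def pvSwapLoop (tmp : List Char) : List Char :=
  pvSwapGo tmp (List.range tmp.length)

def pvGetS (num : Int) : Int :=
  let tmp := PySem.Int.toChars num
  let tmp := PySem.List.sorted tmp (fun c => c) false
  let tmp := pvSwapLoop tmp
  -- int(tmp): tmp is a nonempty digit string, so int() always succeeds; .getD 0 is exact here
  (PySem.Int.ofChars? tmp).getD 0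

def pvGetB (num : Int) : Int :=
  (PySem.Int.ofChars? (PySem.List.sorted (PySem.Int.toChars num) (fun c => c) true)).getD 0

def smallestNumber (num : Int) : Int :=
  if num < 0 then -(pvGetB (-num)) else pvGetS num

-- ===== PORT B =====
-- 'for ch in s: cnt[ord(ch) - 48] += 1'  (every ch is a decimal digit, so the index is in range)
def pvCount (s : List Char) : List Int :=
  s.foldl (fun cnt c => cnt.modify (c.toNat - 48) (· + 1)) (List.replicate 10 0)

-- chr(48 + d) * k  for a digit d and a nonnegative count k
def pvRep (d : Int) (k : Int) : List Char :=
  List.replicate k.toNat (Char.ofNat (48 + d.toNat))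

-- 'for d in range(1, 10): if cnt[d] > 0: lead = d; break'  (cnt[d]: d is in range 0..9)
def pvFindLead (cnt : List Int) : List Int → Int
  | [] => 0
  | d :: ds => if 0 < cnt.getD d.toNat 0 then d else pvFindLead cnt ds

def smallestNumber_alt (num : Int) : Int :=
  let s := PySem.Int.toChars (num.natAbs : Int)   -- str(abs(num))
  let cnt := pvCount s
  if num < 0 then
    let out := (PySem.List.pyRange 9 (-1) (-1)).foldl
      (fun acc d => acc ++ pvRep d (cnt.getD d.toNat 0)) []
    Neg.neg ((PySem.Int.ofChars? out).getD 0)   -- int() of a nonempty digit string always succeeds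
  else
    let lead := pvFindLead cnt (PySem.List.pyRange 1 10 1)
    if lead = 0 then 0
    else
      let cnt := cnt.modify lead.toNat (· - 1)
      let out := [Char.ofNat (48 + lead.toNat)] ++ pvRep 0 (cnt.getD 0 0)
      let out := (PySem.List.pyRange 1 10 1).foldl
        (fun acc d => acc ++ pvRep d (cnt.getD d.toNat 0)) out
      (PySem.Int.ofChars? out).getD 0

-- ===== PRECONDITION & SPEC =====
def Spec_smallestNumber (num : Int) (out : Int) : Prop := out = smallestNumber_alt num
instance (num : Int) (out : Int) : Decidable (Spec_smallestNumber num out) := by unfold Spec_smallestNumber; infer_instance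

-- ===== CLAIM (what is proved, stated in full; the proofs are below) =====
def Claim_equal_smallestNumber : Prop := ∀ (num : Int), Dom_smallestNumber num → Spec_smallestNumber num (smallestNumber num)

-- ===== LEMMAS AND PROOFS =====

-- the digit characters, and the digit character of d
def pvDigits : List Char := ['0','1','2','3','4','5','6','7','8','9']
def pvCh (d : Nat) : Char := Char.ofNat (48 + d)

-- characterization of Nat.toDigits 10 (str(n) for n ≥ 0)
theorem pvToDigitsCore_eq : ∀ (f n : Nat) (l : List Char), 0 < n → n < 10 ^ f →
    Nat.toDigitsCore 10 f n l = ((Nat.digits 10 n).map Nat.digitChar).reverse ++ l := by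
  intro f
  induction f with
  | zero => intro n l h1 h2; omega
  | succ f ih =>
    intro n l h1 h2
    simp only [Nat.toDigitsCore]
    rw [Nat.digits_def' (by norm_num : (1:Nat) < 10) h1]
    by_cases h : n / 10 = 0
    · simp [h]
    · rw [if_neg h, ih (n / 10) _ (Nat.pos_of_ne_zero h)
        ((Nat.div_lt_iff_lt_mul (by norm_num : 0 < 10)).mpr (by rw [← pow_succ]; exact h2))]
      simp

theorem pvToDigits_eq (n : Nat) :
    Nat.toDigits 10 n = if n = 0 then ['0'] else ((Nat.digits 10 n).map Nat.digitChar).reverse := by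
  by_cases h : n = 0
  · subst h; rfl
  · rw [if_neg h, Nat.toDigits, pvToDigitsCore_eq (n+1) n [] (Nat.pos_of_ne_zero h)
      (lt_trans (Nat.lt_pow_self (n := n) (a := 10) (by norm_num)) (Nat.pow_lt_pow_succ (by norm_num))),
      List.append_nil]

theorem pvDigitChar_mem (d : Nat) (h : d < 10) : Nat.digitChar d ∈ pvDigits := by
  interval_cases d <;> decide

theorem pvDigitChar_ne_zero (d : Nat) (h1 : d < 10) (h2 : d ≠ 0) : Nat.digitChar d ≠ '0' := by
  interval_cases d <;> simp_all <;> decide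

theorem pvToDigits_mem (n : Nat) : ∀ c ∈ Nat.toDigits 10 n, c ∈ pvDigits := by
  rw [pvToDigits_eq]
  split
  · intro c hc; simp at hc; subst hc; decide
  · intro c hc
    simp only [List.mem_reverse, List.mem_map] at hc
    obtain ⟨d, hd, rfl⟩ := hc
    exact pvDigitChar_mem d (Nat.digits_lt_base (by norm_num) hd)

theorem pvToDigits_exists_nonzero (n : Nat) (h : 0 < n) :
    ∃ c ∈ Nat.toDigits 10 n, c ≠ '0' := by
  rw [pvToDigits_eq, if_neg (Nat.pos_iff_ne_zero.mp h)]
  have hne : Nat.digits 10 n ≠ [] := Nat.digits_ne_nil_iff_ne_zero.mpr (Nat.pos_iff_ne_zero.mp h)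
  have hlast := Nat.getLast_digit_ne_zero 10 (Nat.pos_iff_ne_zero.mp h)
  refine ⟨Nat.digitChar ((Nat.digits 10 n).getLast hne), ?_, ?_⟩
  · simp only [List.mem_reverse, List.mem_map]
    exact ⟨_, List.getLast_mem hne, rfl⟩
  · exact pvDigitChar_ne_zero _ (Nat.digits_lt_base (by norm_num) (List.getLast_mem hne)) hlast

-- the counting loop of B computes digit counts
theorem pvIdx_eq (c : Char) (hc : c ∈ pvDigits) (i : Nat) (hi : i < 10) :
    (if c.toNat - 48 = i then (1:Int) else 0) = if c == pvCh i then 1 else 0 := by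
  fin_cases hc <;> interval_cases i <;> simp_all [pvCh]

theorem pvGetD_modify (l : List Int) (e : Nat) (i : Nat) (hi : i < l.length) (f : Int → Int) :
    (l.modify e f).getD i 0 = if e = i then f (l.getD i 0) else l.getD i 0 := by
  rw [List.getD_eq_getElem?_getD, List.getD_eq_getElem?_getD, List.getElem?_modify]
  rw [List.getElem?_eq_getElem hi]
  by_cases h : e = i <;> simp [h]

theorem pvCount_aux (s : List Char) : ∀ (cnt : List Int), cnt.length = 10 →
    (∀ c ∈ s, c ∈ pvDigits) → ∀ i, i < 10 →
    (s.foldl (fun cnt c => cnt.modify (c.toNat - 48) (· + 1)) cnt).getD i 0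
      = cnt.getD i 0 + (s.count (pvCh i) : Int) := by
  induction s with
  | nil => intro cnt _ _ i _; simp
  | cons c s ih =>
    intro cnt hlen hmem i hi
    have hc := hmem c List.mem_cons_self
    have hcn : c.toNat - 48 < 10 := by fin_cases hc <;> decide
    simp only [List.foldl_cons]
    rw [ih _ (by rw [List.length_modify]; exact hlen) (fun x hx => hmem x (List.mem_cons_of_mem _ hx)) i hi]
    rw [pvGetD_modify _ _ _ (by omega)]
    rw [List.count_cons]
    push_cast
    have := pvIdx_eq c hc i hi
    by_cases h : c.toNat - 48 = i
    · rw [if_pos h] ; rw [if_pos h] at this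
      rw [← this]; ring
    · rw [if_neg h]; rw [if_neg h] at this
      rw [← this]; ring

theorem pvFoldLen (s : List Char) : ∀ cnt : List Int,
    (s.foldl (fun cnt c => cnt.modify (c.toNat - 48) (· + 1)) cnt).length = cnt.length := by
  induction s with
  | nil => intro cnt; rfl
  | cons c s ih => intro cnt; simp only [List.foldl_cons]; rw [ih, List.length_modify]

theorem pvCount_getD (s : List Char) (hs : ∀ c ∈ s, c ∈ pvDigits) (i : Nat) (hi : i < 10) :
    (pvCount s).getD i 0 = (s.count (pvCh i) : Int) := by
  rw [pvCount, pvCount_aux s _ (by decide) hs i hi]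
  have : (List.replicate 10 (0:Int)).getD i 0 = 0 := by interval_cases i <;> decide
  rw [this, zero_add]

theorem pvCount_len (s : List Char) : (pvCount s).length = 10 := by
  rw [pvCount, pvFoldLen]; rfl

-- counting sort: the sorted list of an all-digit list is a concatenation of replicates
theorem pvCount_flatMap (D : List Char) (hD : D.Nodup) (k : Char → Nat) (x : Char) :
    (D.flatMap (fun c => List.replicate (k c) c)).count x = if x ∈ D then k x else 0 := by
  induction D with
  | nil => simp
  | cons c D ih =>
    simp only [List.flatMap_cons, List.count_append, List.count_replicate,
      ih (List.nodup_cons.mp hD).2, List.mem_cons]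
    by_cases hx : x = c
    · subst hx
      simp [(List.nodup_cons.mp hD).1]
    · simp [hx, Ne.symm hx]

theorem pvFlatMap_pairwise (D : List Char) (hD : D.Pairwise (· < ·)) (k : Char → Nat) :
    (D.flatMap (fun c => List.replicate (k c) c)).Pairwise (· ≤ ·) := by
  induction D with
  | nil => simp
  | cons c D ih =>
    simp only [List.flatMap_cons]
    rw [List.pairwise_append]
    refine ⟨List.pairwise_replicate.mpr (by simp), ih (List.pairwise_cons.mp hD).2, ?_⟩
    intro a ha b hb
    obtain rfl := (List.eq_of_mem_replicate ha)
    obtain ⟨e, he, hb'⟩ := List.mem_flatMap.mp hb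
    have hbe := List.eq_of_mem_replicate hb'
    subst hbe
    exact le_of_lt ((List.pairwise_cons.mp hD).1 _ he)

theorem pvSorted_eq (s : List Char) (hs : ∀ c ∈ s, c ∈ pvDigits) :
    PySem.List.sorted s (fun c => c) false
      = pvDigits.flatMap (fun c => List.replicate (s.count c) c) := by
  apply PySem.List.sorted_id_eq_of_perm_of_pairwise
  · rw [List.perm_iff_count]
    intro a
    rw [pvCount_flatMap _ (by decide)]
    by_cases ha : a ∈ pvDigits
    · simp [ha]
    · simp [ha, List.count_eq_zero.mpr (fun h => ha (hs a h))]
  · exact pvFlatMap_pairwise _ (by decide) _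

theorem pvSortedRev_eq (s : List Char) (hs : ∀ c ∈ s, c ∈ pvDigits) :
    PySem.List.sorted s (fun c => c) true
      = pvDigits.reverse.flatMap (fun c => List.replicate (s.count c) c) := by
  have hperm : (PySem.List.sorted s (fun c => c) true).Perm
      (pvDigits.reverse.flatMap (fun c => List.replicate (s.count c) c)) := by
    refine (PySem.List.sorted_perm s _ true).trans ?_
    rw [List.perm_iff_count]
    intro a
    rw [pvCount_flatMap _ (by decide)]
    by_cases ha : a ∈ pvDigits
    · simp [List.mem_reverse, ha]
    · simp [List.mem_reverse, ha, List.count_eq_zero.mpr (fun h => ha (hs a h))]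
  have h1 : (PySem.List.sorted s (fun c => c) true).reverse.Perm
      (pvDigits.reverse.flatMap (fun c => List.replicate (s.count c) c)).reverse :=
    (List.reverse_perm _).trans (hperm.trans (List.reverse_perm _).symm)
  have h2 := PySem.List.eq_of_perm_of_pairwise_le_of_injective (fun c : Char => c)
    (fun a b h => h) h1 ?_ ?_
  · have := congrArg List.reverse h2
    simpa using this
  · rw [List.pairwise_reverse]
    exact PySem.List.sorted_pairwise_rev s _
  · have : (pvDigits.reverse.flatMap (fun c => List.replicate (s.count c) c)).reverse
        = pvDigits.flatMap (fun c => List.replicate (s.count c) c) := by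
      simp [List.reverse_flatMap, Function.comp_def, List.reverse_replicate]
    rw [this]
    exact pvFlatMap_pairwise _ (by decide) _

-- A's swap loop on 'z zeros then a nonzero char then the rest'
theorem pvSwapGo_spec (z : Nat) (c : Char) (t : List Char) (hc : c ≠ '0') :
    ∀ n i, i + n = (List.replicate z '0' ++ c :: t).length → i ≤ z →
      pvSwapGo (List.replicate z '0' ++ c :: t) (List.range' i n)
        = c :: List.replicate z '0' ++ t := by
  intro n
  induction n with
  | zero =>
    intro i hn hi
    simp at hn
    omega
  | succ n ih =>
    intro i hn hi
    have hlen : (List.replicate z '0' ++ c :: t).length = z + 1 + t.length := by simp; omega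
    rw [List.range'_succ, pvSwapGo]
    by_cases hiz : i < z
    · have h0 : (List.replicate z '0' ++ c :: t).getD i ' ' = '0' := by
        rw [List.getD_eq_getElem?_getD, List.getElem?_append_left (by simpa using hiz),
          List.getElem?_replicate, if_pos hiz]
        rfl
      rw [h0]
      simp only [ne_eq, not_true_eq_false, if_false]
      exact ih (i+1) (by omega) (by omega)
    · have hiz' : i = z := by omega
      subst hiz'
      have hz : (List.replicate i '0' ++ c :: t).getD i ' ' = c := by
        rw [List.getD_eq_getElem?_getD, List.getElem?_append_right (by simp), List.length_replicate]
        simp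
      rw [hz, if_pos hc]
      rcases Nat.eq_zero_or_pos i with hz0 | hz0
      · subst hz0; simp
      · have h0 : (List.replicate i '0' ++ c :: t).getD 0 ' ' = '0' := by
          rw [List.getD_eq_getElem?_getD, List.getElem?_append_left (by simpa using hz0),
            List.getElem?_replicate, if_pos hz0]
          rfl
        rw [h0]
        have hset : (List.replicate i '0' ++ c :: t).set i '0' = List.replicate (i+1) '0' ++ t := by
          simp [List.replicate_succ']
        rw [hset]
        have hrepl : (List.replicate (i+1) '0' ++ t) = '0' :: (List.replicate i '0' ++ t) := by
          simp [List.replicate_succ]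
        rw [hrepl]
        rfl

theorem pvSwapLoop_spec (z : Nat) (c : Char) (t : List Char) (hc : c ≠ '0') :
    pvSwapLoop (List.replicate z '0' ++ c :: t) = c :: List.replicate z '0' ++ t := by
  rw [pvSwapLoop, List.range_eq_range']
  exact pvSwapGo_spec z c t hc _ 0 (by omega) (Nat.zero_le _)

-- B's first-nonzero-digit scan against the concatenation of replicates
theorem pvFlatMap_congr {α β : Type} (l : List α) (f g : α → List β)
    (h : ∀ x ∈ l, f x = g x) : l.flatMap f = l.flatMap g := by
  induction l with
  | nil => rfl
  | cons a l ih =>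
    simp only [List.flatMap_cons, h a List.mem_cons_self,
      ih (fun x hx => h x (List.mem_cons_of_mem _ hx))]

theorem pvBuild (ds : List Int) : ∀ (cnt : List Int), cnt.length = 10 →
    (∀ d ∈ ds, 0 ≤ d ∧ d.toNat < 10) → ds.Nodup → (0:Int) ∉ ds →
    (pvFindLead cnt ds = 0 → ∀ d ∈ ds, cnt.getD d.toNat 0 ≤ 0) ∧
    (pvFindLead cnt ds ≠ 0 →
       pvFindLead cnt ds ∈ ds ∧
       ds.flatMap (fun d => pvRep d (cnt.getD d.toNat 0))
         = pvCh (pvFindLead cnt ds).toNat ::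
           ds.flatMap (fun d => pvRep d ((cnt.modify (pvFindLead cnt ds).toNat (· - 1)).getD d.toNat 0))) := by
  induction ds with
  | nil => intro cnt _ _ _ _; exact ⟨fun _ d hd => absurd hd (List.not_mem_nil), fun h => absurd rfl h⟩
  | cons d ds ih =>
    intro cnt hlen hds hnd h0
    have hd := hds d List.mem_cons_self
    have hds' := fun x hx => hds x (List.mem_cons_of_mem _ hx)
    have hnd' := (List.nodup_cons.mp hnd).2
    have hdnotin := (List.nodup_cons.mp hnd).1
    have h0' : (0:Int) ∉ ds := fun h => h0 (List.mem_cons_of_mem _ h)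
    have hd0 : d ≠ 0 := fun h => h0 (h ▸ List.mem_cons_self)
    by_cases hpos : 0 < cnt.getD d.toNat 0
    · have hlead : pvFindLead cnt (d :: ds) = d := by
        simp only [pvFindLead]; rw [if_pos hpos]
      constructor
      · intro h; rw [hlead] at h; exact absurd h hd0
      · intro _
        rw [hlead]
        refine ⟨List.mem_cons_self, ?_⟩
        simp only [List.flatMap_cons]
        have hrep : pvRep d (cnt.getD d.toNat 0)
            = pvCh d.toNat :: pvRep d (cnt.getD d.toNat 0 - 1) := by
          rw [pvRep, pvRep]
          have : (cnt.getD d.toNat 0).toNat = (cnt.getD d.toNat 0 - 1).toNat + 1 := by omega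
          rw [this, List.replicate_succ]
          rfl
        rw [hrep]
        have hcnt' : (cnt.modify d.toNat (· - 1)).getD d.toNat 0 = cnt.getD d.toNat 0 - 1 := by
          rw [pvGetD_modify _ _ _ (by omega), if_pos rfl]
        rw [hcnt']
        have hrest : ds.flatMap (fun e => pvRep e ((cnt.modify d.toNat (· - 1)).getD e.toNat 0))
            = ds.flatMap (fun e => pvRep e (cnt.getD e.toNat 0)) := by
          apply pvFlatMap_congr
          intro e he
          have hed : e ≠ d := fun h => hdnotin (h ▸ he)
          have he' := hds' e he
          rw [pvGetD_modify _ _ _ (by omega), if_neg (by omega)]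
        rw [hrest]
        rfl
    · have hlead : pvFindLead cnt (d :: ds) = pvFindLead cnt ds := by
        simp only [pvFindLead]; rw [if_neg hpos]
      have hrepd : pvRep d (cnt.getD d.toNat 0) = [] := by
        rw [pvRep]
        have : (cnt.getD d.toNat 0).toNat = 0 := by omega
        rw [this]; rfl
      obtain ⟨ihz, ihnz⟩ := ih cnt hlen hds' hnd' h0'
      constructor
      · intro h e he
        rw [hlead] at h
        rcases List.mem_cons.mp he with rfl | he'
        · omega
        · exact ihz h e he'
      · intro h
        rw [hlead] at h ⊢
        obtain ⟨hmem, heq⟩ := ihnz h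
        refine ⟨List.mem_cons_of_mem _ hmem, ?_⟩
        simp only [List.flatMap_cons]
        rw [hrepd, List.nil_append, heq]
        have hldne : (pvFindLead cnt ds).toNat ≠ d.toNat := by
          have := hds' _ hmem
          have hne : pvFindLead cnt ds ≠ d := fun hh => hdnotin (hh ▸ hmem)
          omega
        have hle : (cnt.modify (pvFindLead cnt ds).toNat (· - 1)).getD d.toNat 0 ≤ 0 := by
          rw [pvGetD_modify _ _ _ (by omega), if_neg hldne]
          omega
        have hrepd' : pvRep d ((cnt.modify (pvFindLead cnt ds).toNat (· - 1)).getD d.toNat 0) = [] := by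
          rw [pvRep]
          have h2 : ((cnt.modify (pvFindLead cnt ds).toNat (· - 1)).getD d.toNat 0).toNat = 0 := by omega
          rw [h2]; rfl
        rw [hrepd', List.nil_append]

-- one replicate block of B, written with the digit counts of s
theorem pvRep_cnt (s : List Char) (hs : ∀ c ∈ s, c ∈ pvDigits) (d : Int) (_h1 : 0 ≤ d) (h2 : d.toNat < 10) :
    pvRep d ((pvCount s).getD d.toNat 0)
      = List.replicate (s.count (pvCh d.toNat)) (pvCh d.toNat) := by
  rw [pvCount_getD s hs d.toNat h2, pvRep, Int.toNat_natCast]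
  rfl

-- ===== VERDICT (by name: the statement is the Claim_ definition above) =====
theorem smallestNumber_spec : Claim_equal_smallestNumber := by
  intro num _
  unfold Spec_smallestNumber
  by_cases hneg : num < 0
  · -- negative branch: both build the digits in descending order
    have hmem := pvToDigits_mem num.natAbs
    have htcA : PySem.Int.toChars (-num) = Nat.toDigits 10 num.natAbs := by
      rw [PySem.Int.toChars, if_neg (by omega)]
      congr 1
      omega
    have htcB : PySem.Int.toChars ((num.natAbs : Nat) : Int) = Nat.toDigits 10 num.natAbs := by
      rw [PySem.Int.toChars, if_neg (by omega)]
      congr 1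
    have hpy : PySem.List.pyRange 9 (-1) (-1) = ([9,8,7,6,5,4,3,2,1,0] : List Int) := by decide
    simp only [smallestNumber, smallestNumber_alt, pvGetB, if_pos hneg, htcA, htcB, hpy]
    rw [pvSortedRev_eq _ hmem, PySem.List.foldl_append_eq_flatMap, List.nil_append]
    have hflat : ([9,8,7,6,5,4,3,2,1,0] : List Int).flatMap
          (fun d => pvRep d ((pvCount (Nat.toDigits 10 num.natAbs)).getD d.toNat 0))
        = pvDigits.reverse.flatMap
          (fun c => List.replicate ((Nat.toDigits 10 num.natAbs).count c) c) := by
      rw [show pvDigits.reverse = (['9','8','7','6','5','4','3','2','1','0'] : List Char) from by decide]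
      simp only [List.flatMap_cons, List.flatMap_nil, List.append_nil]
      rw [pvRep_cnt _ hmem 9 (by norm_num) (by norm_num), pvRep_cnt _ hmem 8 (by norm_num) (by norm_num),
        pvRep_cnt _ hmem 7 (by norm_num) (by norm_num), pvRep_cnt _ hmem 6 (by norm_num) (by norm_num),
        pvRep_cnt _ hmem 5 (by norm_num) (by norm_num), pvRep_cnt _ hmem 4 (by norm_num) (by norm_num),
        pvRep_cnt _ hmem 3 (by norm_num) (by norm_num), pvRep_cnt _ hmem 2 (by norm_num) (by norm_num),
        pvRep_cnt _ hmem 1 (by norm_num) (by norm_num), pvRep_cnt _ hmem 0 (by norm_num) (by norm_num)]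
      rw [show pvCh (9:Int).toNat = '9' from by decide, show pvCh (8:Int).toNat = '8' from by decide,
        show pvCh (7:Int).toNat = '7' from by decide, show pvCh (6:Int).toNat = '6' from by decide,
        show pvCh (5:Int).toNat = '5' from by decide, show pvCh (4:Int).toNat = '4' from by decide,
        show pvCh (3:Int).toNat = '3' from by decide, show pvCh (2:Int).toNat = '2' from by decide,
        show pvCh (1:Int).toNat = '1' from by decide, show pvCh (0:Int).toNat = '0' from by decide]
    rw [hflat]
  · -- nonnegative branch
    by_cases h00 : num = 0
    · subst h00; decide
    · have hpos : 0 < num.toNat := by omega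
      set cs := Nat.toDigits 10 num.toNat with hcs
      have hmem : ∀ c ∈ cs, c ∈ pvDigits := pvToDigits_mem num.toNat
      have htcA : PySem.Int.toChars num = cs := by
        rw [PySem.Int.toChars, if_neg hneg]
      have htcB : PySem.Int.toChars ((num.natAbs : Nat) : Int) = cs := by
        rw [PySem.Int.toChars, if_neg (by omega)]
        rw [hcs]
        congr 1
        omega
      have hpy : PySem.List.pyRange 1 10 1 = ([1,2,3,4,5,6,7,8,9] : List Int) := by decide
      have hlen : (pvCount cs).length = 10 := pvCount_len cs
      obtain ⟨hzc, hnzc⟩ := pvBuild ([1,2,3,4,5,6,7,8,9] : List Int) (pvCount cs) hlen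
        (by decide) (by decide) (by decide)
      -- the leading digit exists because num > 0 has a nonzero digit
      have hlnz : pvFindLead (pvCount cs) ([1,2,3,4,5,6,7,8,9] : List Int) ≠ 0 := by
        intro hl
        obtain ⟨c, hcm, hcne⟩ := pvToDigits_exists_nonzero num.toNat hpos
        have hcount : 0 < cs.count c := List.count_pos_iff.mpr hcm
        have hall := hzc hl
        have hcd := hmem c hcm
        fin_cases hcd
        · exact hcne rfl
        · have h1 := hall 1 (by decide)
          rw [show ((1:Int)).toNat = 1 from rfl, pvCount_getD _ hmem 1 (by norm_num),
            show pvCh 1 = '1' from by decide] at h1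
          omega
        · have h1 := hall 2 (by decide)
          rw [show ((2:Int)).toNat = 2 from rfl, pvCount_getD _ hmem 2 (by norm_num),
            show pvCh 2 = '2' from by decide] at h1
          omega
        · have h1 := hall 3 (by decide)
          rw [show ((3:Int)).toNat = 3 from rfl, pvCount_getD _ hmem 3 (by norm_num),
            show pvCh 3 = '3' from by decide] at h1
          omega
        · have h1 := hall 4 (by decide)
          rw [show ((4:Int)).toNat = 4 from rfl, pvCount_getD _ hmem 4 (by norm_num),
            show pvCh 4 = '4' from by decide] at h1
          omega
        · have h1 := hall 5 (by decide)
          rw [show ((5:Int)).toNat = 5 from rfl, pvCount_getD _ hmem 5 (by norm_num),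
            show pvCh 5 = '5' from by decide] at h1
          omega
        · have h1 := hall 6 (by decide)
          rw [show ((6:Int)).toNat = 6 from rfl, pvCount_getD _ hmem 6 (by norm_num),
            show pvCh 6 = '6' from by decide] at h1
          omega
        · have h1 := hall 7 (by decide)
          rw [show ((7:Int)).toNat = 7 from rfl, pvCount_getD _ hmem 7 (by norm_num),
            show pvCh 7 = '7' from by decide] at h1
          omega
        · have h1 := hall 8 (by decide)
          rw [show ((8:Int)).toNat = 8 from rfl, pvCount_getD _ hmem 8 (by norm_num),
            show pvCh 8 = '8' from by decide] at h1
          omega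
        · have h1 := hall 9 (by decide)
          rw [show ((9:Int)).toNat = 9 from rfl, pvCount_getD _ hmem 9 (by norm_num),
            show pvCh 9 = '9' from by decide] at h1
          omega
      obtain ⟨hldmem, hN⟩ := hnzc hlnz
      set lead := pvFindLead (pvCount cs) ([1,2,3,4,5,6,7,8,9] : List Int) with hlead
      have hldfacts : 1 ≤ lead.toNat ∧ lead.toNat < 10 :=
        (by decide : ∀ x ∈ ([1,2,3,4,5,6,7,8,9] : List Int), 1 ≤ x.toNat ∧ x.toNat < 10) _ hldmem
      have hchne : pvCh lead.toNat ≠ '0' := by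
        intro hcontra
        have h3 := congrArg Char.toNat hcontra
        rw [pvCh, Char.toNat_ofNat,
          if_pos (Or.inl (by omega) : (48 + lead.toNat).isValidChar),
          show Char.toNat '0' = 48 from rfl] at h3
        omega
      -- B's nonzero-digit tail equals A's sorted tail
      have hNeq : (['1','2','3','4','5','6','7','8','9'] : List Char).flatMap
            (fun c => List.replicate (cs.count c) c)
          = ([1,2,3,4,5,6,7,8,9] : List Int).flatMap
            (fun d => pvRep d ((pvCount cs).getD d.toNat 0)) := by
        simp only [List.flatMap_cons, List.flatMap_nil, List.append_nil]
        rw [pvRep_cnt _ hmem 1 (by norm_num) (by norm_num), pvRep_cnt _ hmem 2 (by norm_num) (by norm_num),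
          pvRep_cnt _ hmem 3 (by norm_num) (by norm_num), pvRep_cnt _ hmem 4 (by norm_num) (by norm_num),
          pvRep_cnt _ hmem 5 (by norm_num) (by norm_num), pvRep_cnt _ hmem 6 (by norm_num) (by norm_num),
          pvRep_cnt _ hmem 7 (by norm_num) (by norm_num), pvRep_cnt _ hmem 8 (by norm_num) (by norm_num),
          pvRep_cnt _ hmem 9 (by norm_num) (by norm_num)]
        rfl
      have hsorted : PySem.List.sorted cs (fun c => c) false
          = List.replicate (cs.count '0') '0'
            ++ pvCh lead.toNat ::
              ([1,2,3,4,5,6,7,8,9] : List Int).flatMap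
                (fun d => pvRep d (((pvCount cs).modify lead.toNat (· - 1)).getD d.toNat 0)) := by
        rw [pvSorted_eq cs hmem,
          show pvDigits = '0' :: (['1','2','3','4','5','6','7','8','9'] : List Char) from rfl,
          List.flatMap_cons, hNeq, hN]
      have hcnt0 : ((pvCount cs).modify lead.toNat (· - 1)).getD 0 0 = ((cs.count '0' : Nat) : Int) := by
        rw [pvGetD_modify _ _ _ (by omega), if_neg (by omega), pvCount_getD _ hmem 0 (by norm_num)]
        rfl
      have hrep0 : pvRep 0 (((pvCount cs).modify lead.toNat (· - 1)).getD 0 0)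
          = List.replicate (cs.count '0') '0' := by
        rw [hcnt0, pvRep, Int.toNat_natCast]
        rfl
      -- assemble both sides
      simp only [smallestNumber, smallestNumber_alt, pvGetS, if_neg hneg, htcA, htcB, hpy]
      rw [if_neg hlnz]
      rw [show pvFindLead (pvCount cs) ([1,2,3,4,5,6,7,8,9] : List Int) = lead from hlead.symm]
      rw [hsorted, pvSwapLoop_spec (cs.count '0') (pvCh lead.toNat) _ hchne]
      rw [PySem.List.foldl_append_eq_flatMap, hrep0]
      simp [pvCh]
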